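-- pv_equiv track=rewrite | github.com/somshekargr/nlp2.0 | nlp-search/search_engine/autocorrect_engine.py | new_string
-- ===== SOURCE A (Python) =====
-- import itertools
--
-- def new_string(text_string,limit):
--     newstring=[]
--     new_s = [(a, list(b)) for a, b in itertools.groupby(text_string)]
--
--     for a, b in new_s:
--
--         if len(b)>limit:
--             string=b[0]*limit
--
--         else:
--             string="".join(b)
--         newstring.append(string)
--     newstring="".join(newstring)
--
--     return newstring
-- ===== SOURCE B (Python) =====
-- def new_string(text_string, limit):
--     prev = None
--     count = 0
--     result = []
--     for ch in text_string:
--         if ch == prev: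
--             count += 1
--         else:
--             prev = ch
--             count = 1
--         if count <= limit:
--             result.append(ch)
--     return "".join(result)
-- ===== Notes on version B (the rewrite author's own statement) =====
-- stated objective: simpler
-- what changed: Replaces the groupby/group-list-building/slice approach with a single streaming pass tracking (prev, count) and emitting each character only while its run is within the limit; no group lists are materialised.
import Mathlib
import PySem

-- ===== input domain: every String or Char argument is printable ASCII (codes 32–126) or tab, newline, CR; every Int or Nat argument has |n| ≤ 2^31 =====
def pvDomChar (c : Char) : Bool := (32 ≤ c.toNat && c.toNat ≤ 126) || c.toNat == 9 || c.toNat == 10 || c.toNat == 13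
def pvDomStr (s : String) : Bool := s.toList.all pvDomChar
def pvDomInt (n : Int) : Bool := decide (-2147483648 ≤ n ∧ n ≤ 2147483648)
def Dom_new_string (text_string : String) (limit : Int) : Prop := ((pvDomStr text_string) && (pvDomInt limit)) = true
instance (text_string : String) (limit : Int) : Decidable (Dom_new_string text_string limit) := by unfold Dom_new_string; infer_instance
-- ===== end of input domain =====

-- B replaces the groupby-then-cap approach with one streaming pass keeping (prev, count); same return value, same asymptotic cost.

-- ===== PORT A =====
-- itertools.groupby: forward run-splitting, each group = (key, list of equal chars)
def pyGroupby (l : List Char) : List (Char × List Char) :=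
  match l with
  | [] => []
  | c :: cs =>
      (c, c :: cs.takeWhile (· == c)) :: pyGroupby (cs.dropWhile (· == c))
termination_by l.length
decreasing_by
  have := List.length_dropWhile_le (· == c) cs
  simp
  omega

-- the loop body: b[0]*limit (negative limit gives "", via Int.toNat) or "".join(b);
-- b is a groupby group hence nonempty, so b[0] = b.headD p.1
def capGroup (limit : Int) (p : Char × List Char) : List Char :=
  if (p.2.length : Int) > limit then List.replicate limit.toNat (p.2.headD p.1) else p.2

def new_string (text_string : String) (limit : Int) : String :=
  String.mk ((pyGroupby text_string.toList).foldl (fun acc p => acc ++ capGroup limit p) [])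

-- ===== PORT B =====
-- state = (prev, count, result); one step of Source B's loop body
def altStep (limit : Int) (st : Option Char × Int × List Char) (c : Char) : Option Char × Int × List Char :=
  let count := if st.1 = some c then st.2.1 + 1 else 1
  (some c, count, st.2.2 ++ if count ≤ limit then [c] else [])

def new_string_alt (text_string : String) (limit : Int) : String :=
  String.mk ((text_string.toList.foldl (altStep limit) (none, 0, [])).2.2)

-- ===== PRECONDITION & SPEC =====
def Spec_new_string (text_string : String) (limit : Int) (out : String) : Prop := out = new_string_alt text_string limit
instance (text_string : String) (limit : Int) (out : String) : Decidable (Spec_new_string text_string limit out) := by unfold Spec_new_string; infer_instance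

-- ===== CLAIM (what is proved, stated in full; the proofs are below) =====
def Claim_equal_new_string : Prop := ∀ (text_string : String) (limit : Int), Dom_new_string text_string limit → Spec_new_string text_string limit (new_string text_string limit)

-- ===== LEMMAS AND PROOFS =====

-- running B's loop through a block of n copies of the current character c
theorem altStep_run (limit : Int) (c : Char) : ∀ (n : ℕ) (k : Int) (acc rest : List Char),
    List.foldl (altStep limit) (some c, k, acc) (List.replicate n c ++ rest)
      = List.foldl (altStep limit) (some c, k + n, acc ++ List.replicate (min n (limit - k).toNat) c) rest := by
  intro n
  induction n with
  | zero => intro k acc rest; simp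
  | succ n ih =>
      intro k acc rest
      rw [List.replicate_succ, List.cons_append, List.foldl_cons]
      show List.foldl (altStep limit)
          (some c, (if (some c : Option Char) = some c then k + 1 else 1),
            acc ++ if (if (some c : Option Char) = some c then k + 1 else 1) ≤ limit then [c] else []) _ = _
      simp only [if_true]
      rw [ih (k + 1)]
      have hk : k + 1 + (n : Int) = k + ((n : ℕ) + 1 : ℕ) := by push_cast; ring
      rw [hk, List.append_assoc]
      congr 2
      by_cases h : k + 1 ≤ limit
      · rw [if_pos h]
        have : (min (n + 1) (limit - k).toNat) = (min n (limit - (k + 1)).toNat) + 1 := by omega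
        rw [this, List.replicate_succ]
        simp
      · rw [if_neg h]
        have h1 : (limit - (k + 1)).toNat = 0 := by omega
        have h2 : (limit - k).toNat ≤ 0 := by omega
        simp [h1, Nat.le_zero.mp h2]

-- the result component only depends on the state through the first loop step
theorem altStep_restart (limit : Int) (rest : List Char) (p p' : Option Char) (k k' : Int) (acc : List Char)
    (h : ∀ d, rest.head? = some d →
      (if p = some d then k + 1 else 1) = (if p' = some d then k' + 1 else 1)) :
    (List.foldl (altStep limit) (p, k, acc) rest).2.2
      = (List.foldl (altStep limit) (p', k', acc) rest).2.2 := by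
  cases rest with
  | nil => rfl
  | cons d t =>
      have hd := h d rfl
      simp only [List.foldl_cons, altStep, hd]

-- main invariant: B's fold from the fresh state computes A's per-group capped concatenation
theorem altStep_main (limit : Int) : ∀ (n : ℕ) (l : List Char), l.length ≤ n → ∀ (acc : List Char),
    (List.foldl (altStep limit) (none, 0, acc) l).2.2
      = acc ++ (pyGroupby l).flatMap (capGroup limit) := by
  intro n
  induction n with
  | zero =>
      intro l hl acc
      have : l = [] := List.eq_nil_of_length_eq_zero (Nat.le_zero.mp hl)
      subst this; simp [pyGroupby]
  | succ n ih =>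
      intro l hl acc
      cases l with
      | nil => simp [pyGroupby]
      | cons c cs =>
          have hsplit : cs.takeWhile (· == c) ++ cs.dropWhile (· == c) = cs :=
            List.takeWhile_append_dropWhile
          have hrun : cs.takeWhile (· == c) = List.replicate (cs.takeWhile (· == c)).length c := by
            apply List.eq_replicate_of_mem
            intro b hb
            have := List.mem_takeWhile_imp hb
            exact eq_of_beq this
          -- first loop step
          rw [List.foldl_cons]
          show (List.foldl (altStep limit)
              (some c, (if (none : Option Char) = some c then (0:Int) + 1 else 1),
                acc ++ if (if (none : Option Char) = some c then (0:Int) + 1 else 1) ≤ limit then [c] else []) cs).2.2 = _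
          simp only [reduceCtorEq, if_false]
          -- run through the first group, then restart
          conv_lhs => rw [← hsplit, hrun]
          rw [altStep_run]
          rw [altStep_restart limit _ (some c) none (1 + ((cs.takeWhile (· == c)).length : Int)) 0 _ ?_]
          · rw [ih (cs.dropWhile (· == c)) (by
              have h1 := List.length_dropWhile_le (· == c) cs
              simp at hl; omega)]
            rw [pyGroupby]
            rw [List.flatMap_cons]
            rw [List.append_assoc, List.append_assoc]
            congr 1
            rw [← List.append_assoc]
            congr 1
            -- capped first group
            set m := (cs.takeWhile (· == c)).length with hm
            have hcap : capGroup limit (c, c :: cs.takeWhile (· == c))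
                = List.replicate (min (m + 1) limit.toNat) c := by
              rw [capGroup]
              by_cases hgt : ((c :: cs.takeWhile (· == c)).length : Int) > limit
              · rw [if_pos hgt]
                simp only [List.headD_cons]
                congr 1
                simp only [List.length_cons, ← hm] at hgt
                omega
              · rw [if_neg hgt]
                simp only [List.length_cons, ← hm] at hgt
                rw [show min (m + 1) limit.toNat = m + 1 by omega]
                rw [List.replicate_succ]
                rw [hrun]
            rw [hcap]
            by_cases h1 : (1:Int) ≤ limit
            · rw [if_pos h1]
              rw [show min (m + 1) limit.toNat = 1 + min m (limit - 1).toNat by omega]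
              rw [List.replicate_add]
              simp
            · rw [if_neg h1]
              rw [show min m (limit - 1).toNat = 0 by omega,
                  show min (m + 1) limit.toNat = 0 by omega]
              simp
          · -- restart condition: head of dropWhile differs from c
            intro d hd
            have hne : ¬ (d == c) = true := by
              have hh := List.head?_dropWhile_not (· == c) cs
              rw [hd] at hh
              simp at hh
              simp [hh]
            have : ¬ ((some c : Option Char) = some d) := by
              intro h; apply hne; cases h; exact beq_self_eq_true c
            rw [if_neg this, if_neg (by simp)]

-- ===== VERDICT (by name: the statement is the Claim_ definition above) =====
theorem new_string_spec : Claim_equal_new_string := by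
  intro text_string limit _
  show new_string text_string limit = new_string_alt text_string limit
  rw [new_string, new_string_alt]
  rw [PySem.List.foldl_append_eq_flatMap]
  rw [altStep_main limit text_string.toList.length text_string.toList (le_refl _) []]
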